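-- pv_equiv track=rewrite | github.com/insub4067/CodingTest | 프로그래머스/레벨2/석유시추.py | solution
-- ===== SOURCE A (Python) =====
-- from collections import deque
-- from collections import deque
--
-- def solution(land):
--     answer = 0
--
--     height = len(land)
--     width = len(land[0])
--
--     def findSize(y, x, land):
--
--         visited[y][x] = True
--         answer = 1
--
--         q = deque([(y, x)])
--         while q:
--             y, x = q.popleft()
--
--             for dy, dx in directions:
--                 ny, nx = y + dy, x + dx
--                 # 범위 확인
--                 if 0 <= ny < height and 0 <= nx < width:
--                     # 방문, 조건 확인
--                     if land[ny][nx] == 1 and not visited[ny][nx]: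
--                         answer += 1
--                         visited[ny][nx] = True
--                         q.append((ny, nx))
--
--         return answer
--
--     for x in range(width):
--         sum = 0
--         visited = [[False] * width for _ in range(height)]
--         for y in range(height):
--             if land[y][x] == 1 and not visited[y][x]:
--                 size = findSize(y, x, land)
--                 sum += size
--         answer = max(sum, answer)
--
--     return answer
--
-- directions = [(0, -1), (0, 1), (-1, 0), (1, 0)]
-- ===== SOURCE B (Python) =====
-- def solution(land):
--     height = len(land)
--     width = len(land[0])
--
--     def is_oil(y, x):
--         return 0 <= y < height and 0 <= x < width and land[y][x] == 1
--
--     # One global DFS labeling pass (explicit stack, visited set); each component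
--     # adds its size once to every column it spans; answer = max column total.
--     seen = set()
--     cols = [0] * width
--     for sy in range(height):
--         for sx in range(width):
--             if is_oil(sy, sx) and (sy, sx) not in seen:
--                 seen.add((sy, sx))
--                 stack = [(sy, sx)]
--                 comp = [(sy, sx)]
--                 while stack:
--                     y, x = stack.pop()
--                     for n in ((y - 1, x), (y + 1, x), (y, x - 1), (y, x + 1)):
--                         if is_oil(n[0], n[1]) and n not in seen:
--                             seen.add(n)
--                             stack.append(n)
--                             comp.append(n)
--                 size = len(comp)
--                 for cx in {c[1] for c in comp}:
--                     cols[cx] += size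
--     best = 0
--     for total in cols:
--         best = max(best, total)
--     return best
-- ===== Notes on version B (the rewrite author's own statement) =====
-- stated objective: faster
-- what changed: Replaces A's per-column re-flooding (a fresh visited grid and repeated BFS for every column, so each component is re-explored once per spanned column) by a single global DFS labeling pass with an explicit stack and a visited set; each component adds its size once to every column it spans and the answer is the maximum column total.
import Mathlib
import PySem

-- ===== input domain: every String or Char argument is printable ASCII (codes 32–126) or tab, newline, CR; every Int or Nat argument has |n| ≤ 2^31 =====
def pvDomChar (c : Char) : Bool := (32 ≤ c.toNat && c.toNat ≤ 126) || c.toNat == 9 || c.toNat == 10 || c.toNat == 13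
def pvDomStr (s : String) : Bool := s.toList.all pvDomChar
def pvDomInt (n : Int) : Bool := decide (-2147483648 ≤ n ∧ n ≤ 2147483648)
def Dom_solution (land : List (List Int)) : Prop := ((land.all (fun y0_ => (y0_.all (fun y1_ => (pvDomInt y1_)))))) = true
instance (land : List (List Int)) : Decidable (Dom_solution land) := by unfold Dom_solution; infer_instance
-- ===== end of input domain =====

-- B replaces A's per-column re-flooding by ONE global DFS labeling pass
-- (each component adds its size to every column it spans); measured faster.

-- ===== PORT A =====
-- module-level constant `directions`
def dirs : List (Int × Int) := [(0,-1),(0,1),(-1,0),(1,0)]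

-- land[y][x] ; only evaluated after the 0<=y<H, 0<=x<W bounds check, where it is exact
def cellVal (land : List (List Int)) (y x : Int) : Int :=
  match PySem.List.pyGet? land y with
  | some row => (PySem.List.pyGet? row x).getD 0
  | none => 0

-- `0 <= ny < height and 0 <= nx < width`
def inb (H W y x : Int) : Bool :=
  decide (0 ≤ y) && decide (y < H) && decide (0 ≤ x) && decide (x < W)

-- body of A's `for dy, dx in directions` (visited is represented by the list of
-- its true cells; state = (visited, q, answer))
def bfsStepA (land : List (List Int)) (H W y x : Int)
    (s : List (Int × Int) × List (Int × Int) × Int) (d : Int × Int) :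
    List (Int × Int) × List (Int × Int) × Int :=
  let ny := y + d.1
  let nx := x + d.2
  if inb H W ny nx && (cellVal land ny nx == 1) && !(s.1.contains (ny, nx)) then
    ((ny, nx) :: s.1, s.2.1 ++ [(ny, nx)], s.2.2 + 1)
  else s

-- A's `while q` BFS loop (fuel = H*W+1 only makes it total; proved sufficient below)
def bfsA (land : List (List Int)) (H W : Int) :
    Nat → List (Int × Int) → List (Int × Int) → Int → List (Int × Int) × Int
  | _, [], vis, ans => (vis, ans)
  | 0, _ :: _, vis, ans => (vis, ans)
  | fuel + 1, (y, x) :: q, vis, ans =>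
    let s := dirs.foldl (bfsStepA land H W y x) (vis, q, ans)
    bfsA land H W fuel s.2.1 s.1 s.2.2

-- A's findSize: mark the seed, answer = 1, BFS; returns (visited, size)
def findSizeA (land : List (List Int)) (H W y x : Int) (vis : List (Int × Int)) :
    List (Int × Int) × Int :=
  bfsA land H W ((H * W).toNat + 1) [(y, x)] ((y, x) :: vis) 1

def solution (land : List (List Int)) : Int :=
  let H : Int := land.length
  let W : Int := ((PySem.List.pyGet? land 0).getD []).length
  (PySem.List.pyRange 0 W 1).foldl (fun answer x =>
    let r := (PySem.List.pyRange 0 H 1).foldl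
      (fun (s : List (Int × Int) × Int) y =>
        if cellVal land y x == 1 && !(s.1.contains (y, x)) then
          let fs := findSizeA land H W y x s.1
          (fs.1, s.2 + fs.2)
        else s) ([], 0)
    max r.2 answer) 0

-- ===== PORT B =====
-- Source B's tuple `((y-1,x),(y+1,x),(y,x-1),(y,x+1))` of neighbour candidates
def nbrs (y x : Int) : List (Int × Int) :=
  [(y - 1, x), (y + 1, x), (y, x - 1), (y, x + 1)]

-- Source B's `is_oil`: the chained bounds test plus the cell read (the read is only
-- reached when the bounds hold, where it is exact)
def isOil (land : List (List Int)) (H W y x : Int) : Bool :=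
  decide (0 ≤ y ∧ y < H ∧ 0 ≤ x ∧ x < W) &&
    ((PySem.List.pyGet? ((PySem.List.pyGet? land y).getD []) x).getD 0 == 1)

-- body of Source B's `for n in (…)`: push a fresh oil neighbour; the Python stack
-- (append/pop at the END) is encoded head-as-top; state = (seen, stack, comp)
def dfsPush (land : List (List Int)) (H W : Int)
    (s : List (Int × Int) × List (Int × Int) × List (Int × Int)) (c : Int × Int) :
    List (Int × Int) × List (Int × Int) × List (Int × Int) :=
  if isOil land H W c.1 c.2 && !(s.1.contains c) then
    (c :: s.1, c :: s.2.1, s.2.2 ++ [c])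
  else s

-- Source B's `while stack` DFS loop (fuel = H*W+1 only makes it total)
def dfsB (land : List (List Int)) (H W : Int) :
    Nat → List (Int × Int) → List (Int × Int) → List (Int × Int) →
    List (Int × Int) × List (Int × Int)
  | _, [], seen, comp => (seen, comp)
  | 0, _ :: _, seen, comp => (seen, comp)
  | fuel + 1, (y, x) :: st, seen, comp =>
    let s := (nbrs y x).foldl (dfsPush land H W) (seen, st, comp)
    dfsB land H W fuel s.2.1 s.1 s.2.2

def solution_alt (land : List (List Int)) : Int :=
  let H : Int := land.length
  let W : Int := ((PySem.List.pyGet? land 0).getD []).length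
  let st := (PySem.List.pyRange 0 H 1).foldl
    (fun (s : List (Int × Int) × List Int) sy =>
      (PySem.List.pyRange 0 W 1).foldl
        (fun (s : List (Int × Int) × List Int) sx =>
          if isOil land H W sy sx && !(s.1.contains (sy, sx)) then
            let fb := dfsB land H W ((H * W).toNat + 1) [(sy, sx)]
                        ((sy, sx) :: s.1) [(sy, sx)]
            let size : Int := fb.2.length
            let xs := PySem.Set.ofList (fb.2.map Prod.snd)
            (fb.1, xs.foldl
              (fun cols cx =>
                PySem.List.pySetD cols cx (PySem.List.pyGetD cols cx 0 + size)) s.2)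
          else s) s)
    ([], List.replicate W.toNat 0)
  st.2.foldl (fun best total => max best total) 0

-- ===== PRECONDITION & SPEC =====
-- Pre_ excludes exactly the inputs on which A raises (IndexError): the empty
-- grid (land[0]) and grids with a row shorter than the first row.
def Pre_solution (land : List (List Int)) : Prop :=
  land ≠ [] ∧ ∀ row ∈ land, land.headI.length ≤ row.length
instance (land : List (List Int)) : Decidable (Pre_solution land) := by
  unfold Pre_solution; infer_instance

def pvWitness_solution : List (List Int) := [[1, 0], [1, 1]]

def Spec_solution (land : List (List Int)) (out : Int) : Prop := out = solution_alt land
instance (land : List (List Int)) (out : Int) : Decidable (Spec_solution land out) := by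
  unfold Spec_solution; infer_instance

-- ===== CLAIM (what is proved, stated in full; the proofs are below) =====
def Claim_equal_solution : Prop :=
  ∀ (land : List (List Int)), Dom_solution land → Pre_solution land →
    Spec_solution land (solution land)

-- ===== LEMMAS AND PROOFS =====

-- ---- abstract graph layer ----

def GoodP (L : List (List Int)) (h w : Nat) (c : Int × Int) : Prop :=
  0 ≤ c.1 ∧ c.1 < (h : Int) ∧ 0 ≤ c.2 ∧ c.2 < (w : Int) ∧ cellVal L c.1 c.2 = 1

def Stp (L : List (List Int)) (h w : Nat) (c d : Int × Int) : Prop :=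
  GoodP L h w c ∧ GoodP L h w d ∧ ∃ t ∈ dirs, d = (c.1 + t.1, c.2 + t.2)

def Reach (L : List (List Int)) (h w : Nat) : (Int × Int) → (Int × Int) → Prop :=
  Relation.ReflTransGen (Stp L h w)

lemma good_iff_bool (L : List (List Int)) (h w : Nat) (y x : Int) :
    (inb (h : Int) (w : Int) y x && (cellVal L y x == 1)) = true ↔ GoodP L h w (y, x) := by
  simp [inb, GoodP, and_assoc]

lemma readB_eq_cellVal (L : List (List Int)) (y x : Int) :
    (PySem.List.pyGet? ((PySem.List.pyGet? L y).getD []) x).getD 0 = cellVal L y x := by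
  cases hrow : PySem.List.pyGet? L y with
  | none =>
    simp only [cellVal, hrow, Option.getD_none]
    simp only [PySem.List.pyGet?, PySem.List.pyIdx?, List.length_nil]
    split_ifs <;> simp
  | some row => simp only [cellVal, hrow, Option.getD_some]

lemma isOil_iff_good (L : List (List Int)) (h w : Nat) (y x : Int) :
    isOil L (h : Int) (w : Int) y x = true ↔ GoodP L h w (y, x) := by
  simp [isOil, readB_eq_cellVal, GoodP, and_assoc]

lemma mem_nbrs_iff (y x : Int) (c : Int × Int) :
    c ∈ nbrs y x ↔ ∃ t ∈ dirs, c = (y + t.1, x + t.2) := by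
  simp only [nbrs, dirs, List.mem_cons, List.not_mem_nil, or_false]
  constructor
  · rintro (rfl | rfl | rfl | rfl)
    · exact ⟨(-1, 0), by simp, by simp; ring⟩
    · exact ⟨(1, 0), by simp, by simp⟩
    · exact ⟨(0, -1), by simp, by simp; ring⟩
    · exact ⟨(0, 1), by simp, by simp⟩
  · rintro ⟨t, (rfl | rfl | rfl | rfl), rfl⟩ <;> norm_num [sub_eq_add_neg]

lemma stp_symm (L : List (List Int)) (h w : Nat) {c d : Int × Int}
    (hcd : Stp L h w c d) : Stp L h w d c := by
  obtain ⟨hc, hd, t, ht, rfl⟩ := hcd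
  refine ⟨hd, hc, (-t.1, -t.2), ?_, ?_⟩
  · simp only [dirs, List.mem_cons, List.not_mem_nil, or_false] at ht ⊢
    rcases ht with h1 | h1 | h1 | h1 <;> subst h1 <;> simp
  · cases c with
    | mk cy cx => simp

lemma reach_symm (L : List (List Int)) (h w : Nat) {c d : Int × Int}
    (hcd : Reach L h w c d) : Reach L h w d c :=
  Relation.ReflTransGen.symmetric (fun _ _ hs => stp_symm L h w hs) hcd

lemma reach_good (L : List (List Int)) (h w : Nat) {c d : Int × Int}
    (hc : GoodP L h w c) (hr : Reach L h w c d) : GoodP L h w d := by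
  induction hr with
  | refl => exact hc
  | tail _ hstep _ => exact hstep.2.1

lemma reach_closed (L : List (List Int)) (h w : Nat) (S : Set (Int × Int))
    (hS : ∀ c ∈ S, ∀ d, Stp L h w c d → d ∈ S) {a b : Int × Int}
    (ha : a ∈ S) (hr : Reach L h w a b) : b ∈ S := by
  induction hr with
  | refl => exact ha
  | tail _ hstep ih => exact hS _ ih _ hstep

noncomputable def Box (h w : Nat) : Finset (Int × Int) :=
  Finset.Icc 0 ((h : Int) - 1) ×ˢ Finset.Icc 0 ((w : Int) - 1)

lemma mem_box_of_good (L : List (List Int)) (h w : Nat) {c : Int × Int}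
    (hc : GoodP L h w c) : c ∈ Box h w := by
  obtain ⟨h1, h2, h3, h4, _⟩ := hc
  simp only [Box, Finset.mem_product, Finset.mem_Icc]
  omega

lemma card_box (h w : Nat) : (Box h w).card = h * w := by
  have h1 : ((h : Int) - 1 + 1 - 0).toNat = h := by omega
  have h2 : ((w : Int) - 1 + 1 - 0).toNat = w := by omega
  simp only [Box, Finset.card_product, Int.card_Icc, h1, h2]

lemma finite_of_good (L : List (List Int)) (h w : Nat) (C : Set (Int × Int))
    (hC : ∀ c ∈ C, GoodP L h w c) : C.Finite :=
  Set.Finite.subset (Box h w).finite_toSet (fun c hc => mem_box_of_good L h w (hC c hc))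

lemma ncard_le_box (L : List (List Int)) (h w : Nat) (C : Set (Int × Int))
    (hC : ∀ c ∈ C, GoodP L h w c) : C.ncard ≤ h * w := by
  have h1 : C ⊆ (↑(Box h w) : Set (Int × Int)) :=
    fun c hc => mem_box_of_good L h w (hC c hc)
  calc C.ncard ≤ (↑(Box h w) : Set (Int × Int)).ncard :=
        Set.ncard_le_ncard h1 (Box h w).finite_toSet
    _ = h * w := by rw [Set.ncard_coe_finset, card_box]

lemma length_le_ncard (l : List (Int × Int)) (hnd : l.Nodup) (C : Set (Int × Int))
    (hsub : ∀ c ∈ l, c ∈ C) (hfin : C.Finite) : l.length ≤ C.ncard := by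
  have h1 : (↑l.toFinset : Set (Int × Int)) ⊆ C := by
    intro c hc; exact hsub c (List.mem_toFinset.mp hc)
  calc l.length = l.toFinset.card := (List.toFinset_card_of_nodup hnd).symm
    _ = (↑l.toFinset : Set (Int × Int)).ncard := (Set.ncard_coe_finset _).symm
    _ ≤ C.ncard := Set.ncard_le_ncard h1 hfin

lemma length_eq_ncard (l : List (Int × Int)) (hnd : l.Nodup) (C : Set (Int × Int))
    (hiff : ∀ c, c ∈ l ↔ c ∈ C) : l.length = C.ncard := by
  have hC : C = ↑l.toFinset := by ext c; simp [← hiff]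
  rw [hC, Set.ncard_coe_finset, List.toFinset_card_of_nodup hnd]

-- common final step of both worklist loops: once the worklist is empty
lemma worklist_final (L : List (List Int)) (h w : Nat)
    (cells vis : List (Int × Int)) (V0 C : Set (Int × Int))
    (hCre : ∀ d ∈ C, ∃ c ∈ cells, Reach L h w c d)
    (hvis : ∀ c : Int × Int, c ∈ vis ↔ c ∈ V0 ∨ c ∈ cells)
    (hcells : ∀ c ∈ cells, c ∈ C)
    (hnd : cells.Nodup)
    (hproc : ∀ c ∈ cells, ∀ d, Stp L h w c d → d ∈ cells) :
    (∀ c, c ∈ cells ↔ c ∈ C) ∧ cells.Nodup ∧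
    (∀ c, c ∈ vis ↔ c ∈ V0 ∨ c ∈ C) := by
  have hiff : ∀ c, c ∈ cells ↔ c ∈ C := by
    intro c
    constructor
    · exact hcells c
    · intro hc
      obtain ⟨a, ha, hr⟩ := hCre c hc
      exact reach_closed L h w {d | d ∈ cells} (fun b hb d hs => hproc b hb d hs) ha hr
  refine ⟨hiff, hnd, fun c => ?_⟩
  rw [hvis c]
  constructor
  · rintro (h1 | h1)
    exacts [Or.inl h1, Or.inr ((hiff c).mp h1)]
  · rintro (h1 | h1)
    exacts [Or.inl h1, Or.inr ((hiff c).mpr h1)]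

lemma notin_reach (L : List (List Int)) (h w : Nat) (V0 : Set (Int × Int))
    (hV0cl : ∀ c ∈ V0, ∀ d, Stp L h w c d → d ∈ V0) {s0 : Int × Int}
    (hnm : s0 ∉ V0) : ∀ c ∈ V0, ¬ Reach L h w s0 c := by
  intro c hc hr
  exact hnm (reach_closed L h w V0 hV0cl hc (reach_symm L h w hr))

-- ---- proof-only ghost of A's BFS that collects the cells it counts ----

def bfsStepC (land : List (List Int)) (H W y x : Int)
    (s : List (Int × Int) × List (Int × Int) × List (Int × Int)) (d : Int × Int) :
    List (Int × Int) × List (Int × Int) × List (Int × Int) :=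
  let ny := y + d.1
  let nx := x + d.2
  if inb H W ny nx && (cellVal land ny nx == 1) && !(s.1.contains (ny, nx)) then
    ((ny, nx) :: s.1, s.2.1 ++ [(ny, nx)], s.2.2 ++ [(ny, nx)])
  else s

def bfsC (land : List (List Int)) (H W : Int) :
    Nat → List (Int × Int) → List (Int × Int) → List (Int × Int) →
    List (Int × Int) × List (Int × Int)
  | _, [], vis, cells => (vis, cells)
  | 0, _ :: _, vis, cells => (vis, cells)
  | fuel + 1, (y, x) :: q, vis, cells =>
    let s := dirs.foldl (bfsStepC land H W y x) (vis, q, cells)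
    bfsC land H W fuel s.2.1 s.1 s.2.2

lemma foldC_spec (L : List (List Int)) (h w : Nat) (y x : Int) :
    ∀ (ds : List (Int × Int)) (vis qq cells : List (Int × Int)),
    ∃ new : List (Int × Int),
      List.foldl (bfsStepC L (h : Int) (w : Int) y x) (vis, qq, cells) ds
        = (new.reverse ++ vis, qq ++ new, cells ++ new) ∧
      new.Nodup ∧
      (∀ c ∈ new, c ∉ vis) ∧
      (∀ c ∈ new, GoodP L h w c ∧ ∃ t ∈ ds, c = (y + t.1, x + t.2)) ∧
      (∀ t ∈ ds, GoodP L h w (y + t.1, x + t.2) →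
        ((y + t.1, x + t.2) ∈ vis ∨ (y + t.1, x + t.2) ∈ new)) := by
  intro ds
  induction ds with
  | nil =>
    intro vis qq cells
    exact ⟨[], by simp, by simp, by simp, by simp, by simp⟩
  | cons d ds ih =>
    intro vis qq cells
    rw [List.foldl_cons]
    by_cases hcond : (inb (h : Int) (w : Int) (y + d.1) (x + d.2)
        && (cellVal L (y + d.1) (x + d.2) == 1) && !(vis.contains (y + d.1, x + d.2))) = true
    · have hstep : bfsStepC L (h : Int) (w : Int) y x (vis, qq, cells) d
          = ((y + d.1, x + d.2) :: vis, qq ++ [(y + d.1, x + d.2)], cells ++ [(y + d.1, x + d.2)]) := by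
        simp only [bfsStepC]
        rw [if_pos hcond]
      have hg : GoodP L h w (y + d.1, x + d.2) := by
        rw [Bool.and_eq_true, Bool.and_eq_true] at hcond
        exact (good_iff_bool L h w _ _).mp (by rw [Bool.and_eq_true]; exact hcond.1)
      have hnv : (y + d.1, x + d.2) ∉ vis := by
        rw [Bool.and_eq_true] at hcond
        simpa [List.contains_iff_mem] using hcond.2
      obtain ⟨new', heq, hnd', hnv', hsrc', hcov'⟩ :=
        ih ((y + d.1, x + d.2) :: vis) (qq ++ [(y + d.1, x + d.2)]) (cells ++ [(y + d.1, x + d.2)])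
      refine ⟨(y + d.1, x + d.2) :: new', ?_, ?_, ?_, ?_, ?_⟩
      · rw [hstep, heq]; simp
      · exact List.nodup_cons.mpr ⟨fun hmem => (hnv' _ hmem) (List.mem_cons_self), hnd'⟩
      · intro c hc
        rcases List.mem_cons.mp hc with rfl | hc'
        · exact hnv
        · exact fun hv => (hnv' c hc') (List.mem_cons_of_mem _ hv)
      · intro c hc
        rcases List.mem_cons.mp hc with rfl | hc'
        · exact ⟨hg, d, List.mem_cons_self, rfl⟩
        · obtain ⟨hgc, t, ht, hct⟩ := hsrc' c hc'
          exact ⟨hgc, t, List.mem_cons_of_mem _ ht, hct⟩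
      · intro t ht hgt
        rcases List.mem_cons.mp ht with rfl | ht'
        · exact Or.inr (List.mem_cons_self)
        · rcases hcov' t ht' hgt with hv | hn
          · rcases List.mem_cons.mp hv with he | hv'
            · exact Or.inr (by rw [he]; exact List.mem_cons_self)
            · exact Or.inl hv'
          · exact Or.inr (List.mem_cons_of_mem _ hn)
    · have hstep : bfsStepC L (h : Int) (w : Int) y x (vis, qq, cells) d = (vis, qq, cells) := by
        simp only [bfsStepC]
        rw [if_neg hcond]
      obtain ⟨new, heq, hnd', hnv', hsrc', hcov'⟩ := ih vis qq cells
      refine ⟨new, by rw [hstep, heq], hnd', hnv', ?_, ?_⟩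
      · intro c hc
        obtain ⟨hgc, t, ht, hct⟩ := hsrc' c hc
        exact ⟨hgc, t, List.mem_cons_of_mem _ ht, hct⟩
      · intro t ht hgt
        rcases List.mem_cons.mp ht with rfl | ht'
        · left
          by_contra hnvst
          apply hcond
          have h1 := (good_iff_bool L h w (y + t.1) (x + t.2)).mpr hgt
          have h2 : vis.contains (y + t.1, x + t.2) = false := by
            rw [← Bool.not_eq_true]
            simpa [List.contains_iff_mem] using hnvst
          rw [h1, h2]
          rfl
        · exact hcov' t ht' hgt

lemma bfsC_q_nil (L : List (List Int)) (H W : Int) (fuel : Nat)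
    (vis cells : List (Int × Int)) : bfsC L H W fuel [] vis cells = (vis, cells) := by
  cases fuel <;> simp [bfsC]

lemma bfsC_spec (L : List (List Int)) (h w : Nat) :
    ∀ (fuel : Nat) (q vis cells : List (Int × Int)) (V0 C : Set (Int × Int)),
    (∀ c ∈ C, GoodP L h w c) →
    (∀ c ∈ C, ∀ d, Stp L h w c d → d ∈ C) →
    (∀ d ∈ C, ∃ c ∈ cells, Reach L h w c d) →
    (∀ c : Int × Int, c ∈ vis ↔ c ∈ V0 ∨ c ∈ cells) →
    (∀ c ∈ V0, c ∉ C) →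
    (∀ c ∈ cells, c ∈ C) →
    (∀ c ∈ q, c ∈ cells) →
    cells.Nodup →
    (∀ c ∈ cells, c ∉ q → ∀ d, Stp L h w c d → d ∈ cells) →
    q.length + (C.ncard - cells.length) ≤ fuel →
    (∀ c, c ∈ (bfsC L (h : Int) (w : Int) fuel q vis cells).2 ↔ c ∈ C) ∧
    (bfsC L (h : Int) (w : Int) fuel q vis cells).2.Nodup ∧
    (∀ c, c ∈ (bfsC L (h : Int) (w : Int) fuel q vis cells).1 ↔ c ∈ V0 ∨ c ∈ C) := by
  intro fuel
  induction fuel with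
  | zero =>
    intro q vis cells V0 C hCg hCcl hCre hvis hV0 hcells hq hnd hproc hfuel
    have hq0 : q = [] := by
      cases q with
      | nil => rfl
      | cons a q' => simp at hfuel
    subst hq0
    rw [bfsC_q_nil]
    exact worklist_final L h w cells vis V0 C hCre hvis hcells hnd
      (fun c hc d hs => hproc c hc (by simp) d hs)
  | succ f ih =>
    intro q vis cells V0 C hCg hCcl hCre hvis hV0 hcells hq hnd hproc hfuel
    cases q with
    | nil =>
      rw [bfsC_q_nil]
      exact worklist_final L h w cells vis V0 C hCre hvis hcells hnd
        (fun c hc d hs => hproc c hc (by simp) d hs)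
    | cons hd0 q' =>
      obtain ⟨y, x⟩ := hd0
      obtain ⟨new, heq, hndnew, hnvnew, hsrc, hcov⟩ := foldC_spec L h w y x dirs vis q' cells
      have hstep : bfsC L (h : Int) (w : Int) (f + 1) ((y, x) :: q') vis cells
          = bfsC L (h : Int) (w : Int) f (q' ++ new) (new.reverse ++ vis) (cells ++ new) := by
        simp only [bfsC]
        rw [heq]
      rw [hstep]
      have hyxC : (y, x) ∈ C := hcells _ (hq _ (List.mem_cons_self))
      have hCfin : C.Finite := finite_of_good L h w C hCg
      have hnewC : ∀ c ∈ new, c ∈ C := by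
        intro c hc
        obtain ⟨hgc, t, ht, hct⟩ := hsrc c hc
        exact hCcl _ hyxC c ⟨hCg _ hyxC, hgc, t, ht, hct⟩
      have hnotcells : ∀ c ∈ new, c ∉ cells := fun c hc hmem =>
        (hnvnew c hc) ((hvis c).mpr (Or.inr hmem))
      have hndall : (cells ++ new).Nodup :=
        List.Nodup.append hnd hndnew (fun a ha hanew => hnotcells a hanew ha)
      have hlen : (cells ++ new).length ≤ C.ncard :=
        length_le_ncard _ hndall C
          (fun c hc => (List.mem_append.mp hc).elim (hcells c) (hnewC c)) hCfin
      apply ih (q' ++ new) (new.reverse ++ vis) (cells ++ new) V0 C hCg hCcl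
      · intro d hd
        obtain ⟨c, hc, hr⟩ := hCre d hd
        exact ⟨c, List.mem_append_left _ hc, hr⟩
      · intro c
        simp only [List.mem_append, List.mem_reverse, hvis c]
        tauto
      · exact hV0
      · intro c hc
        rcases List.mem_append.mp hc with h1 | h1
        exacts [hcells c h1, hnewC c h1]
      · intro c hc
        rcases List.mem_append.mp hc with h1 | h1
        · exact List.mem_append_left _ (hq c (List.mem_cons_of_mem _ h1))
        · exact List.mem_append_right _ h1
      · exact hndall
      · intro c hc hcq d hsd
        rcases List.mem_append.mp hc with h1 | h1
        · by_cases hcyx : c = (y, x)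
          · subst hcyx
            obtain ⟨hg1, hgd, t, ht, hdt⟩ := hsd
            have hdt' : d = (y + t.1, x + t.2) := by simpa using hdt
            subst hdt'
            rcases hcov t ht hgd with hv | hn
            · rcases (hvis _).mp hv with hV | hcells'
              · exact ((hV0 _ hV) (hCcl _ hyxC _ ⟨hg1, hgd, t, ht, by simp⟩)).elim
              · exact List.mem_append_left _ hcells'
            · exact List.mem_append_right _ hn
          · have hnq : c ∉ (y, x) :: q' := by
              intro hmem
              rcases List.mem_cons.mp hmem with h2 | h2
              · exact hcyx h2
              · exact hcq (List.mem_append_left _ h2)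
            exact List.mem_append_left _ (hproc c h1 hnq d hsd)
        · exact (hcq (List.mem_append_right _ h1)).elim
      · simp only [List.length_append]
        simp only [List.length_cons] at hfuel
        simp only [List.length_append] at hlen
        omega

lemma floodC_spec (L : List (List Int)) (h w : Nat) (y x : Int)
    (vis : List (Int × Int)) (V0 : Set (Int × Int))
    (hg : GoodP L h w (y, x))
    (hvis : ∀ c, c ∈ vis ↔ c ∈ V0)
    (hV0cl : ∀ c ∈ V0, ∀ d, Stp L h w c d → d ∈ V0)
    (hnm : (y, x) ∉ V0) :
    (∀ c, c ∈ (bfsC L (h : Int) (w : Int) (((h : Int) * (w : Int)).toNat + 1)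
        [(y, x)] ((y, x) :: vis) [(y, x)]).2 ↔ Reach L h w (y, x) c) ∧
    (bfsC L (h : Int) (w : Int) (((h : Int) * (w : Int)).toNat + 1)
        [(y, x)] ((y, x) :: vis) [(y, x)]).2.Nodup ∧
    (∀ c, c ∈ (bfsC L (h : Int) (w : Int) (((h : Int) * (w : Int)).toNat + 1)
        [(y, x)] ((y, x) :: vis) [(y, x)]).1 ↔ c ∈ V0 ∨ Reach L h w (y, x) c) ∧
    (bfsC L (h : Int) (w : Int) (((h : Int) * (w : Int)).toNat + 1)
        [(y, x)] ((y, x) :: vis) [(y, x)]).2.length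
      = ({d | Reach L h w (y, x) d} : Set (Int × Int)).ncard := by
  have hCg : ∀ c ∈ ({d | Reach L h w (y, x) d} : Set (Int × Int)), GoodP L h w c :=
    fun c hc => reach_good L h w hg hc
  have hCcl : ∀ c ∈ ({d | Reach L h w (y, x) d} : Set (Int × Int)),
      ∀ d, Stp L h w c d → d ∈ ({d | Reach L h w (y, x) d} : Set (Int × Int)) :=
    fun c hc d hs => Relation.ReflTransGen.tail hc hs
  have hfuel : ([(y, x)] : List (Int × Int)).length
      + (({d | Reach L h w (y, x) d} : Set (Int × Int)).ncard - ([(y, x)] : List (Int × Int)).length)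
      ≤ ((h : Int) * (w : Int)).toNat + 1 := by
    have hle := ncard_le_box L h w _ hCg
    have hcast : ((h : Int) * (w : Int)) = ((h * w : Nat) : Int) := by push_cast; ring
    rw [hcast, Int.toNat_natCast]
    simp only [List.length_cons, List.length_nil]
    omega
  obtain ⟨hmem, hnd, hv⟩ := bfsC_spec L h w (((h : Int) * (w : Int)).toNat + 1)
    [(y, x)] ((y, x) :: vis) [(y, x)] V0 {d | Reach L h w (y, x) d}
    hCg hCcl
    (fun d hd => ⟨(y, x), List.mem_cons_self, hd⟩)
    (by intro c; simp only [List.mem_cons, hvis c, List.not_mem_nil, or_false]; tauto)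
    (fun c hc hr => notin_reach L h w V0 hV0cl hnm c hc hr)
    (by intro c hc; simp only [List.mem_cons, List.not_mem_nil, or_false] at hc; subst hc
        exact Relation.ReflTransGen.refl)
    (fun c hc => hc)
    (by simp)
    (by intro c hc hnq
        simp only [List.mem_cons, List.not_mem_nil, or_false] at hc
        exact absurd (by simp [hc]) hnq)
    hfuel
  exact ⟨hmem, hnd, hv, length_eq_ncard _ hnd _ hmem⟩

-- ---- A's counting BFS runs in lockstep with the ghost bfsC ----

lemma foldA_eq_foldC (L : List (List Int)) (H W y x : Int) :
    ∀ (ds : List (Int × Int)) (vis qq cells : List (Int × Int)),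
    List.foldl (bfsStepA L H W y x) (vis, qq, (cells.length : Int)) ds
      = ((List.foldl (bfsStepC L H W y x) (vis, qq, cells) ds).1,
         (List.foldl (bfsStepC L H W y x) (vis, qq, cells) ds).2.1,
         ((List.foldl (bfsStepC L H W y x) (vis, qq, cells) ds).2.2.length : Int)) := by
  intro ds
  induction ds with
  | nil => intro vis qq cells; simp
  | cons d ds ih =>
    intro vis qq cells
    rw [List.foldl_cons, List.foldl_cons]
    by_cases hcond : (inb H W (y + d.1) (x + d.2) && (cellVal L (y + d.1) (x + d.2) == 1)
        && !(vis.contains (y + d.1, x + d.2))) = true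
    · have hA : bfsStepA L H W y x (vis, qq, (cells.length : Int)) d
          = ((y + d.1, x + d.2) :: vis, qq ++ [(y + d.1, x + d.2)], (cells.length : Int) + 1) := by
        simp only [bfsStepA]; rw [if_pos hcond]
      have hC : bfsStepC L H W y x (vis, qq, cells) d
          = ((y + d.1, x + d.2) :: vis, qq ++ [(y + d.1, x + d.2)],
             cells ++ [(y + d.1, x + d.2)]) := by
        simp only [bfsStepC]; rw [if_pos hcond]
      rw [hA, hC]
      have hlen : (cells.length : Int) + 1 = (((cells ++ [(y + d.1, x + d.2)]).length : Nat) : Int) := by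
        simp
      rw [hlen]
      exact ih _ _ _
    · have hA : bfsStepA L H W y x (vis, qq, (cells.length : Int)) d = (vis, qq, (cells.length : Int)) := by
        simp only [bfsStepA]; rw [if_neg hcond]
      have hC : bfsStepC L H W y x (vis, qq, cells) d = (vis, qq, cells) := by
        simp only [bfsStepC]; rw [if_neg hcond]
      rw [hA, hC]
      exact ih _ _ _

lemma bfsA_eq_bfsC (L : List (List Int)) (H W : Int) :
    ∀ (fuel : Nat) (q vis cells : List (Int × Int)),
    bfsA L H W fuel q vis (cells.length : Int)
      = ((bfsC L H W fuel q vis cells).1, ((bfsC L H W fuel q vis cells).2.length : Int)) := by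
  intro fuel
  induction fuel with
  | zero =>
    intro q vis cells
    cases q <;> simp [bfsA, bfsC]
  | succ f ih =>
    intro q vis cells
    cases q with
    | nil => simp [bfsA, bfsC]
    | cons c q' =>
      obtain ⟨y, x⟩ := c
      have hF := foldA_eq_foldC L H W y x dirs vis q' cells
      simp only [bfsA, bfsC, hF]
      exact ih _ _ _

lemma findSizeA_eq (L : List (List Int)) (H W y x : Int) (vis : List (Int × Int)) :
    findSizeA L H W y x vis
      = ((bfsC L H W ((H * W).toNat + 1) [(y, x)] ((y, x) :: vis) [(y, x)]).1,
         ((bfsC L H W ((H * W).toNat + 1) [(y, x)] ((y, x) :: vis) [(y, x)]).2.length : Int)) := by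
  have h1 : (1 : Int) = (([((y, x))] : List (Int × Int)).length : Int) := by simp
  rw [findSizeA, h1, bfsA_eq_bfsC]

-- ---- B's DFS explores exactly the connected component ----

lemma foldDfs_spec (L : List (List Int)) (h w : Nat) :
    ∀ (cs vis st comp : List (Int × Int)),
    ∃ new : List (Int × Int),
      List.foldl (dfsPush L (h : Int) (w : Int)) (vis, st, comp) cs
        = (new.reverse ++ vis, new.reverse ++ st, comp ++ new) ∧
      new.Nodup ∧
      (∀ c ∈ new, c ∉ vis) ∧
      (∀ c ∈ new, GoodP L h w c ∧ c ∈ cs) ∧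
      (∀ c ∈ cs, GoodP L h w c → (c ∈ vis ∨ c ∈ new)) := by
  intro cs
  induction cs with
  | nil =>
    intro vis st comp
    exact ⟨[], by simp, by simp, by simp, by simp, by simp⟩
  | cons c0 cs ih =>
    intro vis st comp
    rw [List.foldl_cons]
    by_cases hcond : (isOil L (h : Int) (w : Int) c0.1 c0.2 && !(vis.contains c0)) = true
    · have hstep : dfsPush L (h : Int) (w : Int) (vis, st, comp) c0
          = (c0 :: vis, c0 :: st, comp ++ [c0]) := by
        simp only [dfsPush]
        rw [if_pos hcond]
      have hg : GoodP L h w c0 := by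
        rw [Bool.and_eq_true] at hcond
        have := (isOil_iff_good L h w c0.1 c0.2).mp hcond.1
        simpa using this
      have hnv : c0 ∉ vis := by
        rw [Bool.and_eq_true] at hcond
        simpa [List.contains_iff_mem] using hcond.2
      obtain ⟨new', heq, hnd', hnv', hsrc', hcov'⟩ := ih (c0 :: vis) (c0 :: st) (comp ++ [c0])
      refine ⟨c0 :: new', ?_, ?_, ?_, ?_, ?_⟩
      · rw [hstep, heq]; simp
      · exact List.nodup_cons.mpr ⟨fun hmem => (hnv' _ hmem) (List.mem_cons_self), hnd'⟩
      · intro c hc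
        rcases List.mem_cons.mp hc with rfl | hc'
        · exact hnv
        · exact fun hv => (hnv' c hc') (List.mem_cons_of_mem _ hv)
      · intro c hc
        rcases List.mem_cons.mp hc with rfl | hc'
        · exact ⟨hg, List.mem_cons_self⟩
        · obtain ⟨hgc, hcs⟩ := hsrc' c hc'
          exact ⟨hgc, List.mem_cons_of_mem _ hcs⟩
      · intro c hc hgc
        rcases List.mem_cons.mp hc with rfl | hc'
        · exact Or.inr List.mem_cons_self
        · rcases hcov' c hc' hgc with hv | hn
          · rcases List.mem_cons.mp hv with he | hv'
            · exact Or.inr (by rw [he]; exact List.mem_cons_self)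
            · exact Or.inl hv'
          · exact Or.inr (List.mem_cons_of_mem _ hn)
    · have hstep : dfsPush L (h : Int) (w : Int) (vis, st, comp) c0 = (vis, st, comp) := by
        simp only [dfsPush]
        rw [if_neg hcond]
      obtain ⟨new, heq, hnd', hnv', hsrc', hcov'⟩ := ih vis st comp
      refine ⟨new, by rw [hstep, heq], hnd', hnv', ?_, ?_⟩
      · intro c hc
        obtain ⟨hgc, hcs⟩ := hsrc' c hc
        exact ⟨hgc, List.mem_cons_of_mem _ hcs⟩
      · intro c hc hgc
        rcases List.mem_cons.mp hc with rfl | hc'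
        · left
          by_contra hnvst
          apply hcond
          have h1 : isOil L (h : Int) (w : Int) c.1 c.2 = true :=
            (isOil_iff_good L h w c.1 c.2).mpr (by simpa using hgc)
          have h2 : vis.contains c = false := by
            rw [← Bool.not_eq_true]
            simpa [List.contains_iff_mem] using hnvst
          rw [h1, h2]
          rfl
        · exact hcov' c hc' hgc

lemma dfsB_st_nil (L : List (List Int)) (H W : Int) (fuel : Nat)
    (vis comp : List (Int × Int)) : dfsB L H W fuel [] vis comp = (vis, comp) := by
  cases fuel <;> simp [dfsB]

lemma dfsB_spec (L : List (List Int)) (h w : Nat) :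
    ∀ (fuel : Nat) (st vis comp : List (Int × Int)) (V0 C : Set (Int × Int)),
    (∀ c ∈ C, GoodP L h w c) →
    (∀ c ∈ C, ∀ d, Stp L h w c d → d ∈ C) →
    (∀ d ∈ C, ∃ c ∈ comp, Reach L h w c d) →
    (∀ c : Int × Int, c ∈ vis ↔ c ∈ V0 ∨ c ∈ comp) →
    (∀ c ∈ V0, c ∉ C) →
    (∀ c ∈ comp, c ∈ C) →
    (∀ c ∈ st, c ∈ comp) →
    comp.Nodup →
    (∀ c ∈ comp, c ∉ st → ∀ d, Stp L h w c d → d ∈ comp) →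
    st.length + (C.ncard - comp.length) ≤ fuel →
    (∀ c, c ∈ (dfsB L (h : Int) (w : Int) fuel st vis comp).2 ↔ c ∈ C) ∧
    (dfsB L (h : Int) (w : Int) fuel st vis comp).2.Nodup ∧
    (∀ c, c ∈ (dfsB L (h : Int) (w : Int) fuel st vis comp).1 ↔ c ∈ V0 ∨ c ∈ C) := by
  intro fuel
  induction fuel with
  | zero =>
    intro st vis comp V0 C hCg hCcl hCre hvis hV0 hcomp hst hnd hproc hfuel
    have hst0 : st = [] := by
      cases st with
      | nil => rfl
      | cons a st' => simp at hfuel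
    subst hst0
    rw [dfsB_st_nil]
    exact worklist_final L h w comp vis V0 C hCre hvis hcomp hnd
      (fun c hc d hs => hproc c hc (by simp) d hs)
  | succ f ih =>
    intro st vis comp V0 C hCg hCcl hCre hvis hV0 hcomp hst hnd hproc hfuel
    cases st with
    | nil =>
      rw [dfsB_st_nil]
      exact worklist_final L h w comp vis V0 C hCre hvis hcomp hnd
        (fun c hc d hs => hproc c hc (by simp) d hs)
    | cons hd0 st' =>
      obtain ⟨y, x⟩ := hd0
      obtain ⟨new, heq, hndnew, hnvnew, hsrc, hcov⟩ := foldDfs_spec L h w (nbrs y x) vis st' comp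
      have hstep : dfsB L (h : Int) (w : Int) (f + 1) ((y, x) :: st') vis comp
          = dfsB L (h : Int) (w : Int) f (new.reverse ++ st') (new.reverse ++ vis) (comp ++ new) := by
        simp only [dfsB]
        rw [heq]
      rw [hstep]
      have hyxC : (y, x) ∈ C := hcomp _ (hst _ (List.mem_cons_self))
      have hCfin : C.Finite := finite_of_good L h w C hCg
      have hnewC : ∀ c ∈ new, c ∈ C := by
        intro c hc
        obtain ⟨hgc, hcs⟩ := hsrc c hc
        obtain ⟨t, ht, hct⟩ := (mem_nbrs_iff y x c).mp hcs
        exact hCcl _ hyxC c ⟨hCg _ hyxC, hgc, t, ht, hct⟩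
      have hnotcomp : ∀ c ∈ new, c ∉ comp := fun c hc hmem =>
        (hnvnew c hc) ((hvis c).mpr (Or.inr hmem))
      have hndall : (comp ++ new).Nodup :=
        List.Nodup.append hnd hndnew (fun a ha hanew => hnotcomp a hanew ha)
      have hlen : (comp ++ new).length ≤ C.ncard :=
        length_le_ncard _ hndall C
          (fun c hc => (List.mem_append.mp hc).elim (hcomp c) (hnewC c)) hCfin
      apply ih (new.reverse ++ st') (new.reverse ++ vis) (comp ++ new) V0 C hCg hCcl
      · intro d hd
        obtain ⟨c, hc, hr⟩ := hCre d hd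
        exact ⟨c, List.mem_append_left _ hc, hr⟩
      · intro c
        simp only [List.mem_append, List.mem_reverse, hvis c]
        tauto
      · exact hV0
      · intro c hc
        rcases List.mem_append.mp hc with h1 | h1
        exacts [hcomp c h1, hnewC c h1]
      · intro c hc
        rcases List.mem_append.mp hc with h1 | h1
        · exact List.mem_append_right _ (List.mem_reverse.mp h1)
        · exact List.mem_append_left _ (hst c (List.mem_cons_of_mem _ h1))
      · exact hndall
      · intro c hc hcst d hsd
        rcases List.mem_append.mp hc with h1 | h1
        · by_cases hcyx : c = (y, x)
          · subst hcyx
            obtain ⟨hg1, hgd, t, ht, hdt⟩ := hsd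
            have hdn : d ∈ nbrs y x := (mem_nbrs_iff y x d).mpr ⟨t, ht, hdt⟩
            rcases hcov d hdn hgd with hv | hn
            · rcases (hvis _).mp hv with hV | hcomp'
              · exact ((hV0 _ hV) (hCcl _ hyxC d ⟨hg1, hgd, t, ht, hdt⟩)).elim
              · exact List.mem_append_left _ hcomp'
            · exact List.mem_append_right _ hn
          · have hnst : c ∉ (y, x) :: st' := by
              intro hmem
              rcases List.mem_cons.mp hmem with h2 | h2
              · exact hcyx h2
              · exact hcst (List.mem_append_right _ h2)
            exact List.mem_append_left _ (hproc c h1 hnst d hsd)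
        · exact (hcst (List.mem_append_left _ (List.mem_reverse.mpr h1))).elim
      · simp only [List.length_append, List.length_reverse]
        simp only [List.length_cons] at hfuel
        simp only [List.length_append] at hlen
        omega

lemma floodDfs_spec (L : List (List Int)) (h w : Nat) (y x : Int)
    (vis : List (Int × Int)) (V0 : Set (Int × Int))
    (hg : GoodP L h w (y, x))
    (hvis : ∀ c, c ∈ vis ↔ c ∈ V0)
    (hV0cl : ∀ c ∈ V0, ∀ d, Stp L h w c d → d ∈ V0)
    (hnm : (y, x) ∉ V0) :
    (∀ c, c ∈ (dfsB L (h : Int) (w : Int) (((h : Int) * (w : Int)).toNat + 1)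
        [(y, x)] ((y, x) :: vis) [(y, x)]).2 ↔ Reach L h w (y, x) c) ∧
    (dfsB L (h : Int) (w : Int) (((h : Int) * (w : Int)).toNat + 1)
        [(y, x)] ((y, x) :: vis) [(y, x)]).2.Nodup ∧
    (∀ c, c ∈ (dfsB L (h : Int) (w : Int) (((h : Int) * (w : Int)).toNat + 1)
        [(y, x)] ((y, x) :: vis) [(y, x)]).1 ↔ c ∈ V0 ∨ Reach L h w (y, x) c) ∧
    (dfsB L (h : Int) (w : Int) (((h : Int) * (w : Int)).toNat + 1)
        [(y, x)] ((y, x) :: vis) [(y, x)]).2.length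
      = ({d | Reach L h w (y, x) d} : Set (Int × Int)).ncard := by
  have hCg : ∀ c ∈ ({d | Reach L h w (y, x) d} : Set (Int × Int)), GoodP L h w c :=
    fun c hc => reach_good L h w hg hc
  have hCcl : ∀ c ∈ ({d | Reach L h w (y, x) d} : Set (Int × Int)),
      ∀ d, Stp L h w c d → d ∈ ({d | Reach L h w (y, x) d} : Set (Int × Int)) :=
    fun c hc d hs => Relation.ReflTransGen.tail hc hs
  have hfuel : ([(y, x)] : List (Int × Int)).length
      + (({d | Reach L h w (y, x) d} : Set (Int × Int)).ncard - ([(y, x)] : List (Int × Int)).length)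
      ≤ ((h : Int) * (w : Int)).toNat + 1 := by
    have hle := ncard_le_box L h w _ hCg
    have hcast : ((h : Int) * (w : Int)) = ((h * w : Nat) : Int) := by push_cast; ring
    rw [hcast, Int.toNat_natCast]
    simp only [List.length_cons, List.length_nil]
    omega
  obtain ⟨hmem, hnd, hv⟩ := dfsB_spec L h w (((h : Int) * (w : Int)).toNat + 1)
    [(y, x)] ((y, x) :: vis) [(y, x)] V0 {d | Reach L h w (y, x) d}
    hCg hCcl
    (fun d hd => ⟨(y, x), List.mem_cons_self, hd⟩)
    (by intro c; simp only [List.mem_cons, hvis c, List.not_mem_nil, or_false]; tauto)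
    (fun c hc hr => notin_reach L h w V0 hV0cl hnm c hc hr)
    (by intro c hc; simp only [List.mem_cons, List.not_mem_nil, or_false] at hc; subst hc
        exact Relation.ReflTransGen.refl)
    (fun c hc => hc)
    (by simp)
    (by intro c hc hnq
        simp only [List.mem_cons, List.not_mem_nil, or_false] at hc
        exact absurd (by simp [hc]) hnq)
    hfuel
  exact ⟨hmem, hnd, hv, length_eq_ncard _ hnd _ hmem⟩

-- ---- named loop bodies of the two ports ----

def colBody (L : List (List Int)) (H W x : Int) (s : List (Int × Int) × Int) (y : Int) :
    List (Int × Int) × Int :=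
  if cellVal L y x == 1 && !(s.1.contains (y, x)) then
    let fs := findSizeA L H W y x s.1
    (fs.1, s.2 + fs.2)
  else s

lemma solution_eq (L : List (List Int)) :
    solution L = (PySem.List.pyRange 0 (((PySem.List.pyGet? L 0).getD []).length : Int) 1).foldl
      (fun answer x =>
        max ((PySem.List.pyRange 0 ((L.length : Int)) 1).foldl
          (colBody L (L.length : Int) (((PySem.List.pyGet? L 0).getD []).length : Int) x)
          ([], 0)).2 answer) 0 := rfl

def scanBody (L : List (List Int)) (H W sy : Int) (s : List (Int × Int) × List Int) (sx : Int) :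
    List (Int × Int) × List Int :=
  if isOil L H W sy sx && !(s.1.contains (sy, sx)) then
    let fb := dfsB L H W ((H * W).toNat + 1) [(sy, sx)] ((sy, sx) :: s.1) [(sy, sx)]
    let size : Int := fb.2.length
    let xs := PySem.Set.ofList (fb.2.map Prod.snd)
    (fb.1, xs.foldl
      (fun cols cx => PySem.List.pySetD cols cx (PySem.List.pyGetD cols cx 0 + size)) s.2)
  else s

lemma solution_alt_eq (L : List (List Int)) :
    solution_alt L = ((PySem.List.pyRange 0 ((L.length : Int)) 1).foldl
      (fun s sy => (PySem.List.pyRange 0 (((PySem.List.pyGet? L 0).getD []).length : Int) 1).foldl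
        (scanBody L (L.length : Int) (((PySem.List.pyGet? L 0).getD []).length : Int) sy) s)
      ([], List.replicate ((((PySem.List.pyGet? L 0).getD []).length : Int)).toNat 0)).2.foldl
      (fun a v => max a v) 0 := rfl


-- ---- per-column invariant of A ----

def ColSet (L : List (List Int)) (h w : Nat) (x k : Int) : Set (Int × Int) :=
  {d | ∃ y : Int, y < k ∧ GoodP L h w (y, x) ∧ Reach L h w (y, x) d}

lemma colSet_good (L : List (List Int)) (h w : Nat) (x k : Int) :
    ∀ c ∈ ColSet L h w x k, GoodP L h w c := by
  rintro c ⟨y, _, hg, hr⟩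
  exact reach_good L h w hg hr

lemma colSet_closed (L : List (List Int)) (h w : Nat) (x k : Int) :
    ∀ c ∈ ColSet L h w x k, ∀ d, Stp L h w c d → d ∈ ColSet L h w x k := by
  rintro c ⟨y, hy, hg, hr⟩ d hs
  exact ⟨y, hy, hg, Relation.ReflTransGen.tail hr hs⟩

lemma colA_inv (L : List (List Int)) (h w : Nat) (x : Int) (hx0 : 0 ≤ x) (hxw : x < (w : Int)) :
    ∀ n : Nat, n ≤ h →
    (∀ c, c ∈ (((List.range n).map (fun (k : Nat) => (k : Int))).foldl
        (colBody L (h : Int) (w : Int) x) ([], 0)).1 ↔ c ∈ ColSet L h w x (n : Int)) ∧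
    (((List.range n).map (fun (k : Nat) => (k : Int))).foldl
        (colBody L (h : Int) (w : Int) x) ([], 0)).2 = ((ColSet L h w x (n : Int)).ncard : Int) := by
  intro n
  induction n with
  | zero =>
    intro _
    simp only [List.range_zero, List.map_nil, List.foldl_nil, Nat.cast_zero]
    have hempty : ColSet L h w x 0 = ∅ := by
      ext d
      simp only [Set.mem_empty_iff_false, iff_false]
      rintro ⟨y, hy, ⟨hy0, _, _, _, _⟩, _⟩
      omega
    constructor
    · intro c
      simp [hempty]
    · simp [hempty]
  | succ n ihn =>
    intro hn1
    have hn : n ≤ h := Nat.le_of_succ_le hn1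
    obtain ⟨ihm, ihs⟩ := ihn hn
    rw [List.range_succ, List.map_append, List.foldl_append]
    set st := ((List.range n).map (fun (k : Nat) => (k : Int))).foldl
      (colBody L (h : Int) (w : Int) x) ([], 0) with hst
    simp only [List.map_cons, List.map_nil, List.foldl_cons, List.foldl_nil]
    by_cases hval : cellVal L (n : Int) x = 1
    · by_cases hmem : ((n : Int), x) ∈ st.1
      · -- already visited: nothing changes
        have hcb : colBody L (h : Int) (w : Int) x st (n : Int) = st := by
          simp [colBody, hmem]
        have hseteq : ColSet L h w x ((n + 1 : Nat) : Int) = ColSet L h w x ((n : Nat) : Int) := by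
          apply Set.Subset.antisymm
          · rintro d ⟨y, hy, hg, hr⟩
            push_cast at hy
            by_cases hyn : y = (n : Int)
            · subst hyn
              obtain ⟨y', hy', hg', hr'⟩ := (ihm _).mp hmem
              exact ⟨y', hy', hg', hr'.trans hr⟩
            · exact ⟨y, by omega, hg, hr⟩
          · rintro d ⟨y, hy, hg, hr⟩
            refine ⟨y, ?_, hg, hr⟩
            push_cast at hy ⊢
            omega
        rw [hcb, hseteq]
        exact ⟨ihm, ihs⟩
      · -- flood fill from the fresh seed (n, x)
        have hg : GoodP L h w ((n : Int), x) := by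
          refine ⟨Int.natCast_nonneg n, ?_, hx0, hxw, hval⟩
          show ((n : Nat) : Int) < ((h : Nat) : Int)
          exact_mod_cast Nat.lt_of_succ_le hn1
        have hcond : (cellVal L (n : Int) x == 1 && !(st.1.contains ((n : Int), x))) = true := by
          simp [hmem, hval]
        have hcb : colBody L (h : Int) (w : Int) x st (n : Int)
            = ((findSizeA L (h : Int) (w : Int) (n : Int) x st.1).1,
               st.2 + (findSizeA L (h : Int) (w : Int) (n : Int) x st.1).2) := by
          simp only [colBody]
          rw [if_pos hcond]
        rw [hcb, findSizeA_eq]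
        have hnm : ((n : Int), x) ∉ ColSet L h w x (n : Int) :=
          fun hc => hmem ((ihm _).mpr hc)
        obtain ⟨hm2, hnd2, hv2, hlen2⟩ := floodC_spec L h w (n : Int) x st.1
          (ColSet L h w x (n : Int)) hg ihm (colSet_closed L h w x (n : Int)) hnm
        have hsetU : ColSet L h w x ((n + 1 : Nat) : Int)
            = ColSet L h w x ((n : Nat) : Int) ∪ {d | Reach L h w ((n : Int), x) d} := by
          apply Set.Subset.antisymm
          · rintro d ⟨y, hy, hgy, hr⟩
            push_cast at hy
            by_cases hyn : y = (n : Int)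
            · subst hyn
              exact Or.inr hr
            · exact Or.inl ⟨y, by omega, hgy, hr⟩
          · rintro d (⟨y, hy, hgy, hr⟩ | hr)
            · refine ⟨y, ?_, hgy, hr⟩
              push_cast at hy ⊢
              omega
            · exact ⟨(n : Int), by push_cast; omega, hg, hr⟩
        have hdisj : Disjoint (ColSet L h w x (n : Int)) {d | Reach L h w ((n : Int), x) d} :=
          Set.disjoint_left.mpr (fun c hc hr =>
            notin_reach L h w _ (colSet_closed L h w x (n : Int)) hnm c hc hr)
        have hfin1 : (ColSet L h w x (n : Int)).Finite :=
          finite_of_good L h w _ (colSet_good L h w x (n : Int))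
        have hfin2 : ({d | Reach L h w ((n : Int), x) d} : Set (Int × Int)).Finite :=
          finite_of_good L h w _ (fun c hc => reach_good L h w hg hc)
        constructor
        · intro c
          rw [hsetU]
          simp only [Set.mem_union]
          exact hv2 c
        · rw [ihs, hsetU, Set.ncard_union_eq hdisj hfin1 hfin2, hlen2]
          push_cast
          ring
    · -- not an oil cell: nothing changes
      have hcb : colBody L (h : Int) (w : Int) x st (n : Int) = st := by
        simp [colBody, hval]
      have hseteq : ColSet L h w x ((n + 1 : Nat) : Int) = ColSet L h w x ((n : Nat) : Int) := by
        apply Set.Subset.antisymm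
        · rintro d ⟨y, hy, hgy, hr⟩
          push_cast at hy
          by_cases hyn : y = (n : Int)
          · subst hyn
            exact absurd hgy.2.2.2.2 hval
          · exact ⟨y, by omega, hgy, hr⟩
        · rintro d ⟨y, hy, hgy, hr⟩
          refine ⟨y, ?_, hgy, hr⟩
          push_cast at hy ⊢
          omega
      rw [hcb, hseteq]
      exact ⟨ihm, ihs⟩


-- ---- global scan invariant of B ----

def TouchSet (L : List (List Int)) (h w : Nat) (i : Int) : Set (Int × Int) :=
  {d | ∃ e : Int × Int, Reach L h w d e ∧ e.2 = i}

def ScanSet (L : List (List Int)) (h w : Nat) (sy sx : Int) : Set (Int × Int) :=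
  {d | ∃ c : Int × Int, GoodP L h w c ∧ Reach L h w c d ∧ (c.1 < sy ∨ (c.1 = sy ∧ c.2 < sx))}

lemma scanSet_good (L : List (List Int)) (h w : Nat) (sy sx : Int) :
    ∀ c ∈ ScanSet L h w sy sx, GoodP L h w c := by
  rintro c ⟨c0, hg, hr, _⟩
  exact reach_good L h w hg hr

lemma scanSet_closed (L : List (List Int)) (h w : Nat) (sy sx : Int) :
    ∀ c ∈ ScanSet L h w sy sx, ∀ d, Stp L h w c d → d ∈ ScanSet L h w sy sx := by
  rintro c ⟨c0, hg, hr, hpos⟩ d hs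
  exact ⟨c0, hg, Relation.ReflTransGen.tail hr hs, hpos⟩

def ScanInv (L : List (List Int)) (h w : Nat) (sy sx : Int)
    (s : List (Int × Int) × List Int) : Prop :=
  (∀ c, c ∈ s.1 ↔ c ∈ ScanSet L h w sy sx) ∧ s.2.length = w ∧
  ∀ i : Nat, i < w → PySem.List.pyGetD s.2 (i : Int) 0
      = (((ScanSet L h w sy sx ∩ TouchSet L h w (i : Int)).ncard : Nat) : Int)

lemma scanInv_congr (L : List (List Int)) (h w : Nat) {sy sx sy' sx' : Int}
    (hset : ScanSet L h w sy sx = ScanSet L h w sy' sx')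
    {s : List (Int × Int) × List Int} (hs : ScanInv L h w sy sx s) :
    ScanInv L h w sy' sx' s := by
  obtain ⟨h1, h2, h3⟩ := hs
  exact ⟨fun c => by rw [h1 c, hset], h2, fun i hi => by rw [h3 i hi, hset]⟩

lemma cols_update (w : Nat) (size : Int) :
    ∀ (xs : List Int) (cols : List Int), xs.Nodup →
    (∀ xx ∈ xs, 0 ≤ xx ∧ xx < (w : Int)) → cols.length = w →
    (xs.foldl (fun cols xx =>
        PySem.List.pySetD cols xx (PySem.List.pyGetD cols xx 0 + size)) cols).length = w ∧
    ∀ i : Nat, i < w →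
      PySem.List.pyGetD (xs.foldl (fun cols xx =>
          PySem.List.pySetD cols xx (PySem.List.pyGetD cols xx 0 + size)) cols) (i : Int) 0
        = PySem.List.pyGetD cols (i : Int) 0 + (if ((i : Int) ∈ xs) then size else 0) := by
  intro xs
  induction xs with
  | nil =>
    intro cols _ _ hlen
    exact ⟨hlen, fun i _ => by simp⟩
  | cons xx xs ih =>
    intro cols hnd hbd hlen
    have hbx := hbd xx List.mem_cons_self
    have hbxs : ∀ z ∈ xs, 0 ≤ z ∧ z < (w : Int) := fun z hz => hbd z (List.mem_cons_of_mem _ hz)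
    rw [List.foldl_cons]
    have hxxeq : xx = ((xx.toNat : Nat) : Int) := (Int.toNat_of_nonneg hbx.1).symm
    have hxlt : xx.toNat < cols.length := by omega
    have hlen' : (PySem.List.pySetD cols xx (PySem.List.pyGetD cols xx 0 + size)).length = w := by
      rw [PySem.List.length_pySetD, hlen]
    obtain ⟨hL, hG⟩ := ih (PySem.List.pySetD cols xx (PySem.List.pyGetD cols xx 0 + size))
      (List.nodup_cons.mp hnd).2 hbxs hlen'
    refine ⟨hL, fun i hi => ?_⟩
    rw [hG i hi]
    have hget : PySem.List.pyGetD
        (PySem.List.pySetD cols xx (PySem.List.pyGetD cols xx 0 + size)) (i : Int) 0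
        = if i = xx.toNat then PySem.List.pyGetD cols xx 0 + size
          else PySem.List.pyGetD cols (i : Int) 0 := by
      rw [hxxeq, PySem.List.pyGetD_pySetD_natCast cols xx.toNat i _ 0 hxlt]
      simp only [Int.toNat_natCast]
      rfl
    rw [hget]
    by_cases hix : i = xx.toNat
    · have hixI : (i : Int) = xx := by omega
      have hnmem : (i : Int) ∉ xs := by
        rw [hixI]
        exact (List.nodup_cons.mp hnd).1
      rw [if_pos hix, if_neg hnmem, if_pos (by rw [hixI]; exact List.mem_cons_self), hixI]
      ring
    · have hixI : (i : Int) ≠ xx := by omega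
      rw [if_neg hix]
      by_cases hmem : (i : Int) ∈ xs
      · rw [if_pos hmem, if_pos (List.mem_cons_of_mem _ hmem)]
      · rw [if_neg hmem, if_neg (by simp [List.mem_cons, hixI, hmem])]

lemma scan_inner (L : List (List Int)) (h w : Nat) (m : Nat) (_hm : m < h)
    (s0 : List (Int × Int) × List Int) (hs0 : ScanInv L h w (m : Int) 0 s0) :
    ∀ n : Nat, n ≤ w →
    ScanInv L h w (m : Int) (n : Int)
      (((List.range n).map (fun (k : Nat) => (k : Int))).foldl
        (scanBody L (h : Int) (w : Int) (m : Int)) s0) := by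
  intro n
  induction n with
  | zero =>
    intro _
    simpa using hs0
  | succ n ihn =>
    intro hn1
    have hn : n ≤ w := Nat.le_of_succ_le hn1
    have ih := ihn hn
    rw [List.range_succ, List.map_append, List.foldl_append]
    set st := ((List.range n).map (fun (k : Nat) => (k : Int))).foldl
      (scanBody L (h : Int) (w : Int) (m : Int)) s0 with hst
    obtain ⟨ihm, ihl, ihc⟩ := ih
    simp only [List.map_cons, List.map_nil, List.foldl_cons, List.foldl_nil]
    by_cases hio : isOil L (h : Int) (w : Int) (m : Int) (n : Int) = true
    · by_cases hmem : ((m : Int), (n : Int)) ∈ st.1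
      · have hcb : scanBody L (h : Int) (w : Int) (m : Int) st (n : Int) = st := by
          simp [scanBody, hmem]
        have hseteq : ScanSet L h w (m : Int) ((n + 1 : Nat) : Int)
            = ScanSet L h w (m : Int) ((n : Nat) : Int) := by
          apply Set.Subset.antisymm
          · rintro d ⟨c, hg, hr, hpos⟩
            push_cast at hpos
            by_cases hc : c = ((m : Int), (n : Int))
            · subst hc
              obtain ⟨c', hg', hr', hpos'⟩ := (ihm _).mp hmem
              exact ⟨c', hg', hr'.trans hr, hpos'⟩
            · refine ⟨c, hg, hr, ?_⟩
              have hne : c.1 ≠ (m : Int) ∨ c.2 ≠ (n : Int) := by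
                rcases eq_or_ne c.1 (m : Int) with h1 | h1
                · rcases eq_or_ne c.2 (n : Int) with h2 | h2
                  · exact absurd (Prod.ext_iff.mpr ⟨h1, h2⟩) hc
                  · exact Or.inr h2
                · exact Or.inl h1
              rcases hpos with h1 | h1
              · exact Or.inl h1
              · rcases hne with h2 | h2 <;> [exact absurd h1.1 h2; exact Or.inr ⟨h1.1, by omega⟩]
          · rintro d ⟨c, hg, hr, hpos⟩
            refine ⟨c, hg, hr, ?_⟩
            push_cast
            rcases hpos with h1 | h1
            · exact Or.inl h1
            · exact Or.inr ⟨h1.1, by omega⟩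
        rw [hcb]
        exact scanInv_congr L h w hseteq.symm ⟨ihm, ihl, ihc⟩
      · -- flood a new component from (m, n)
        have hg : GoodP L h w ((m : Int), (n : Int)) :=
          (isOil_iff_good L h w (m : Int) (n : Int)).mp hio
        have hcond : (isOil L (h : Int) (w : Int) (m : Int) (n : Int)
            && !(st.1.contains ((m : Int), (n : Int)))) = true := by
          simp [hmem, hio]
        have hnm : ((m : Int), (n : Int)) ∉ ScanSet L h w (m : Int) (n : Int) :=
          fun hc => hmem ((ihm _).mpr hc)
        obtain ⟨hm2, hnd2, hv2, hlen2⟩ := floodDfs_spec L h w (m : Int) (n : Int) st.1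
          (ScanSet L h w (m : Int) (n : Int)) hg ihm
          (scanSet_closed L h w (m : Int) (n : Int)) hnm
        set r := dfsB L (h : Int) (w : Int) (((h : Int) * (w : Int)).toNat + 1)
          [((m : Int), (n : Int))] (((m : Int), (n : Int)) :: st.1)
          [((m : Int), (n : Int))] with hr
        have hcb : scanBody L (h : Int) (w : Int) (m : Int) st (n : Int)
            = (r.1, (PySem.Set.ofList (r.2.map Prod.snd)).foldl
                (fun cols xx => PySem.List.pySetD cols xx
                  (PySem.List.pyGetD cols xx 0 + (r.2.length : Int))) st.2) := by
          simp only [scanBody]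
          rw [if_pos hcond]
        rw [hcb]
        set C : Set (Int × Int) := {d | Reach L h w ((m : Int), (n : Int)) d} with hC
        have hsetU : ScanSet L h w (m : Int) ((n + 1 : Nat) : Int)
            = ScanSet L h w (m : Int) ((n : Nat) : Int) ∪ C := by
          apply Set.Subset.antisymm
          · rintro d ⟨c, hgc, hrc, hpos⟩
            push_cast at hpos
            by_cases hceq : c = ((m : Int), (n : Int))
            · subst hceq
              exact Or.inr hrc
            · left
              refine ⟨c, hgc, hrc, ?_⟩
              have hne : c.1 ≠ (m : Int) ∨ c.2 ≠ (n : Int) := by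
                rcases eq_or_ne c.1 (m : Int) with h1 | h1
                · rcases eq_or_ne c.2 (n : Int) with h2 | h2
                  · exact absurd (Prod.ext_iff.mpr ⟨h1, h2⟩) hceq
                  · exact Or.inr h2
                · exact Or.inl h1
              rcases hpos with h1 | h1
              · exact Or.inl h1
              · rcases hne with h2 | h2 <;> [exact absurd h1.1 h2; exact Or.inr ⟨h1.1, by omega⟩]
          · rintro d (⟨c, hgc, hrc, hpos⟩ | hrd)
            · refine ⟨c, hgc, hrc, ?_⟩
              push_cast
              rcases hpos with h1 | h1
              · exact Or.inl h1
              · exact Or.inr ⟨h1.1, by omega⟩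
            · exact ⟨((m : Int), (n : Int)), hg, hrd, Or.inr ⟨rfl, by push_cast; omega⟩⟩
        have hdisj : Disjoint (ScanSet L h w (m : Int) (n : Int)) C :=
          Set.disjoint_left.mpr (fun c hc hrc =>
            notin_reach L h w _ (scanSet_closed L h w (m : Int) (n : Int)) hnm c hc hrc)
        have hfinU : (ScanSet L h w (m : Int) (n : Int)).Finite :=
          finite_of_good L h w _ (scanSet_good L h w (m : Int) (n : Int))
        have hfinC : C.Finite := finite_of_good L h w _ (fun c hc => reach_good L h w hg hc)
        -- the x-coordinates the component spans
        set xs := PySem.Set.ofList (r.2.map Prod.snd) with hxs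
        have hxs_mem : ∀ z : Int, z ∈ xs ↔ ∃ e ∈ C, e.2 = z := by
          intro z
          rw [hxs, PySem.Set.mem_ofList, List.mem_map]
          constructor
          · rintro ⟨e, he, rfl⟩
            exact ⟨e, (hm2 e).mp he, rfl⟩
          · rintro ⟨e, he, rfl⟩
            exact ⟨e, (hm2 e).mpr he, rfl⟩
        have hxs_nd : xs.Nodup := PySem.Set.nodup_ofList _
        have hxs_bd : ∀ z ∈ xs, 0 ≤ z ∧ z < (w : Int) := by
          intro z hz
          obtain ⟨e, he, rfl⟩ := (hxs_mem z).mp hz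
          have hge : GoodP L h w e := reach_good L h w hg he
          exact ⟨hge.2.2.1, hge.2.2.2.1⟩
        obtain ⟨hculen, hcuget⟩ := cols_update w (r.2.length : Int) xs st.2 hxs_nd hxs_bd ihl
        refine ⟨?_, hculen, ?_⟩
        · intro c
          rw [hsetU]
          simp only [Set.mem_union]
          exact hv2 c
        · intro i hi
          rw [hcuget i hi, ihc i hi, hsetU]
          rw [Set.union_inter_distrib_right]
          have hdisj2 : Disjoint (ScanSet L h w (m : Int) (n : Int) ∩ TouchSet L h w (i : Int))
              (C ∩ TouchSet L h w (i : Int)) :=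
            Disjoint.mono Set.inter_subset_left Set.inter_subset_left hdisj
          rw [Set.ncard_union_eq hdisj2 (hfinU.subset Set.inter_subset_left)
            (hfinC.subset Set.inter_subset_left)]
          by_cases htouch : (i : Int) ∈ xs
          · have hCT : C ∩ TouchSet L h w (i : Int) = C := by
              obtain ⟨e0, he0, he0i⟩ := (hxs_mem _).mp htouch
              apply Set.Subset.antisymm Set.inter_subset_left
              intro d hd
              exact ⟨hd, e0, (reach_symm L h w hd).trans he0, he0i⟩
            rw [hCT, if_pos htouch, hlen2]
            push_cast
            ring
          · have hCT : C ∩ TouchSet L h w (i : Int) = ∅ := by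
              ext d0
              simp only [Set.mem_empty_iff_false, iff_false]
              rintro ⟨hd, e, hre, hei⟩
              exact htouch ((hxs_mem _).mpr ⟨e, Relation.ReflTransGen.trans hd hre, hei⟩)
            rw [hCT, if_neg htouch]
            simp
    · have hcb : scanBody L (h : Int) (w : Int) (m : Int) st (n : Int) = st := by
        simp [scanBody, hio]
      have hseteq : ScanSet L h w (m : Int) ((n + 1 : Nat) : Int)
          = ScanSet L h w (m : Int) ((n : Nat) : Int) := by
        apply Set.Subset.antisymm
        · rintro d ⟨c, hgc, hrc, hpos⟩
          push_cast at hpos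
          by_cases hceq : c = ((m : Int), (n : Int))
          · subst hceq
            exact absurd ((isOil_iff_good L h w (m : Int) (n : Int)).mpr hgc) hio
          · refine ⟨c, hgc, hrc, ?_⟩
            have hne : c.1 ≠ (m : Int) ∨ c.2 ≠ (n : Int) := by
              rcases eq_or_ne c.1 (m : Int) with h1 | h1
              · rcases eq_or_ne c.2 (n : Int) with h2 | h2
                · exact absurd (Prod.ext_iff.mpr ⟨h1, h2⟩) hceq
                · exact Or.inr h2
              · exact Or.inl h1
            rcases hpos with h1 | h1
            · exact Or.inl h1
            · rcases hne with h2 | h2 <;> [exact absurd h1.1 h2; exact Or.inr ⟨h1.1, by omega⟩]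
        · rintro d ⟨c, hgc, hrc, hpos⟩
          refine ⟨c, hgc, hrc, ?_⟩
          push_cast
          rcases hpos with h1 | h1
          · exact Or.inl h1
          · exact Or.inr ⟨h1.1, by omega⟩
      rw [hcb]
      exact scanInv_congr L h w hseteq.symm ⟨ihm, ihl, ihc⟩

lemma scan_outer (L : List (List Int)) (h w : Nat) :
    ∀ m : Nat, m ≤ h →
    ScanInv L h w (m : Int) 0
      (((List.range m).map (fun (k : Nat) => (k : Int))).foldl
        (fun s sy => (PySem.List.pyRange 0 (w : Int) 1).foldl
          (scanBody L (h : Int) (w : Int) sy) s)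
        ([], List.replicate w 0)) := by
  intro m
  induction m with
  | zero =>
    intro _
    simp only [Nat.cast_zero]
    have hempty : ScanSet L h w 0 0 = ∅ := by
      ext d
      simp only [Set.mem_empty_iff_false, iff_false]
      rintro ⟨c, ⟨hc1, _, hc3, _, _⟩, _, hpos⟩
      omega
    refine ⟨?_, by simp, ?_⟩
    · intro c
      simp [hempty]
    · intro i hi
      rw [hempty]
      simp [PySem.List.pyGetD_natCast, List.getD_eq_getElem?_getD]
  | succ m ihm =>
    intro hm1
    rw [List.range_succ, List.map_append, List.foldl_append]
    simp only [List.map_cons, List.map_nil, List.foldl_cons, List.foldl_nil]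
    have hrow := scan_inner L h w m (Nat.lt_of_succ_le hm1) _ (ihm (Nat.le_of_succ_le hm1)) w le_rfl
    rw [← PySem.List.pyRange_zero_natCast w] at hrow
    have hset : ScanSet L h w (m : Int) (w : Nat) = ScanSet L h w ((m + 1 : Nat) : Int) 0 := by
      apply Set.Subset.antisymm
      · rintro d ⟨c, hgc, hrc, hpos⟩
        refine ⟨c, hgc, hrc, Or.inl ?_⟩
        push_cast
        rcases hpos with h1 | h1
        · omega
        · omega
      · rintro d ⟨c, hgc, hrc, hpos⟩
        refine ⟨c, hgc, hrc, ?_⟩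
        have hc1 := hgc.1
        have hc2 := hgc.2.1
        have hc3 := hgc.2.2.1
        have hc4 := hgc.2.2.2.1
        push_cast at hpos
        rcases hpos with h1 | h1
        · by_cases hcm : c.1 = (m : Int)
          · exact Or.inr ⟨hcm, hc4⟩
          · exact Or.inl (by omega)
        · omega
    exact scanInv_congr L h w hset hrow


-- ---- final assembly ----

lemma scanSet_touch_eq_colSet (L : List (List Int)) (h w : Nat) (x : Int) :
    ScanSet L h w (h : Int) 0 ∩ TouchSet L h w x = ColSet L h w x (h : Int) := by
  ext d
  constructor
  · rintro ⟨⟨c, hgc, hrc, _⟩, e, hre, hei⟩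
    have hgd : GoodP L h w d := reach_good L h w hgc hrc
    have hge : GoodP L h w e := reach_good L h w hgd hre
    have heq : ((e.1, x) : Int × Int) = e := by
      rw [← hei]
    refine ⟨e.1, hge.2.1, ?_, ?_⟩
    · rw [heq]; exact hge
    · show Reach L h w (e.1, x) d
      rw [heq]
      exact reach_symm L h w hre
  · rintro ⟨y, hy, hgy, hry⟩
    exact ⟨⟨(y, x), hgy, hry, Or.inl hgy.2.1⟩, (y, x), reach_symm L h w hry, rfl⟩

lemma cols_eq_map (L : List (List Int)) (h w : Nat) (cols : List Int)
    (hfl : cols.length = w)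
    (hfc : ∀ i : Nat, i < w → PySem.List.pyGetD cols (i : Int) 0
      = (((ScanSet L h w (h : Int) 0 ∩ TouchSet L h w (i : Int)).ncard : Nat) : Int)) :
    cols = (List.range w).map
      (fun (i : Nat) => (((ColSet L h w (i : Int) (h : Int)).ncard : Nat) : Int)) := by
  apply List.ext_getElem
  · simpa using hfl
  · intro i hi1 hi2
    have hiw : i < w := by rw [hfl] at hi1; exact hi1
    have h1 := hfc i hiw
    rw [scanSet_touch_eq_colSet, PySem.List.pyGetD_natCast, List.getD_eq_getElem cols 0 hi1] at h1
    rw [h1]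
    simp

lemma ports_agree (L : List (List Int)) : solution L = solution_alt L := by
  have hA : solution L
      = (List.range ((PySem.List.pyGet? L 0).getD []).length).foldl
          (fun (a : Int) (i : Nat) =>
            max (((ColSet L L.length ((PySem.List.pyGet? L 0).getD []).length
              (i : Int) (L.length : Int)).ncard : Nat) : Int) a) 0 := by
    rw [solution_eq]
    simp only [PySem.List.pyRange_zero_natCast]
    rw [List.foldl_map]
    apply PySem.List.foldl_congr_mem
    intro acc i hi
    rw [(colA_inv L L.length ((PySem.List.pyGet? L 0).getD []).length (i : Int)
      (Int.natCast_nonneg i) (by exact_mod_cast List.mem_range.mp hi) L.length le_rfl).2]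
  have hsc := scan_outer L L.length ((PySem.List.pyGet? L 0).getD []).length L.length le_rfl
  simp only [PySem.List.pyRange_zero_natCast] at hsc
  obtain ⟨hfm, hfl, hfc⟩ := hsc
  have hB : solution_alt L
      = (List.range ((PySem.List.pyGet? L 0).getD []).length).foldl
          (fun (a : Int) (i : Nat) =>
            max a (((ColSet L L.length ((PySem.List.pyGet? L 0).getD []).length
              (i : Int) (L.length : Int)).ncard : Nat) : Int)) 0 := by
    rw [solution_alt_eq]
    simp only [PySem.List.pyRange_zero_natCast, Int.toNat_natCast]
    rw [cols_eq_map L L.length ((PySem.List.pyGet? L 0).getD []).length _ hfl hfc]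
    rw [List.foldl_map]
  rw [hA, hB]
  apply PySem.List.foldl_congr_mem
  intro acc i _
  exact max_comm _ _

-- ===== VERDICT =====
theorem solution_spec : Claim_equal_solution := by
  intro land _hdom _hpre
  show solution land = solution_alt land
  exact ports_agree land
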